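-- pv_equiv track=rewrite | github.com/shatayu-mehta/-cv5561-f25-team-VGGT | vggt/geo_prop_new.py | build_reverse_index
-- ===== SOURCE A (Python) =====
-- def build_reverse_index(priors_dict):
--     index = {}
--     for category, items in priors_dict.items():
--         if category not in index: index[category] = []
--         index[category].append(category)
--         for item in items:
--             item_clean = item.lower().strip()
--             if item_clean not in index:
--                 index[item_clean] = []
--             if category not in index[item_clean]:
--                 index[item_clean].append(category)
--     return index
-- ===== SOURCE B (Python) =====
-- def build_reverse_index(priors_dict):
--     # Per-key gather: precompute cleaned item lists, derive the key order
--     # (first occurrence of category-then-items), then build each reverse list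
--     # directly as "all categories that mention this key", in category order.
--     cleaned = [(c, [it.lower().strip() for it in its]) for c, its in priors_dict.items()]
--     keys = list(dict.fromkeys(k for c, its in cleaned for k in [c, *its]))
--     return {k: [c for c, its in cleaned if c == k or k in its] for k in keys}
-- ===== Notes on version B (the rewrite author's own statement) =====
-- stated objective: alternative
-- what changed: B inverts the construction: instead of A's incremental scatter into a mutated dict with inline membership guards, B precomputes the cleaned item lists, derives the full key order once (first occurrence of category-then-items), and builds each reverse list directly by a per-key gather over all categories.
import Mathlib
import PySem

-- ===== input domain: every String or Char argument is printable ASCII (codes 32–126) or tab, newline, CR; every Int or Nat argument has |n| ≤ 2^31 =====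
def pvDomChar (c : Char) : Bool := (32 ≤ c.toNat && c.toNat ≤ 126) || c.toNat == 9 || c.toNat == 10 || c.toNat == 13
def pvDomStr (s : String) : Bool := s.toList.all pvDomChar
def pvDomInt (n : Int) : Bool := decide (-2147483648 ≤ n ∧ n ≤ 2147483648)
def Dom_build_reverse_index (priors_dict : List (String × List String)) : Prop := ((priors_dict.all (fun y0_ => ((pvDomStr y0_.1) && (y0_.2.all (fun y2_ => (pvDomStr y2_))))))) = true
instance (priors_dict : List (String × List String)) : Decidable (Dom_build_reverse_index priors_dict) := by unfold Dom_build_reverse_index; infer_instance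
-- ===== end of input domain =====

-- B inverts A's construction: a per-key gather over a precomputed key order instead of
-- A's per-category scatter into a mutated dict (alternative decomposition, not faster).

-- ===== PORT A =====
-- inner loop body of A: for item in items: …
def briInner (category : String) (index : PySem.Dict String (List String)) (item : String) :
    PySem.Dict String (List String) :=
  let item_clean := PySem.Str.strip (PySem.Str.lower item)
  let index := if index.contains item_clean then index else index.insert item_clean []
  if category ∈ index.getD item_clean [] then index
  else index.modify item_clean [] (fun l => l ++ [category])

-- outer loop body of A: for category, items in priors_dict.items(): …
def briOuter (index : PySem.Dict String (List String)) (p : String × List String) :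
    PySem.Dict String (List String) :=
  let category := p.1
  let index := if index.contains category then index else index.insert category []
  let index := index.modify category [] (fun l => l ++ [category])
  p.2.foldl (briInner category) index

def build_reverse_index (priors_dict : List (String × List String)) : List (String × List String) :=
  (priors_dict.foldl briOuter PySem.Dict.empty).items

-- ===== PORT B =====
-- item.lower().strip()
def pvClean (s : String) : String := PySem.Str.strip (PySem.Str.lower s)

def build_reverse_index_alt (priors_dict : List (String × List String)) : List (String × List String) :=
  let cleaned := priors_dict.map (fun p => (p.1, p.2.map pvClean))
  let keys := PySem.List.dedup (cleaned.flatMap (fun p => p.1 :: p.2))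
  keys.map (fun k => (k, (cleaned.filter (fun p => p.1 == k || p.2.contains k)).map Prod.fst))

-- ===== PRECONDITION & SPEC =====
-- Pre_ excludes association lists with duplicate keys: they do not represent any Python
-- dict (A's parameter is a dict, whose keys are necessarily distinct), so nothing A
-- accepts is excluded.
def Pre_build_reverse_index (priors_dict : List (String × List String)) : Prop :=
  (priors_dict.map Prod.fst).Nodup
instance (priors_dict : List (String × List String)) : Decidable (Pre_build_reverse_index priors_dict) := by unfold Pre_build_reverse_index; infer_instance

def pvWitness_build_reverse_index : (List (String × List String)) :=
  [("animal", ["Dog ", "cat"]), ("dog", ["Animal"])]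

def Spec_build_reverse_index (priors_dict : List (String × List String)) (out : List (String × List String)) : Prop := out = build_reverse_index_alt priors_dict
instance (priors_dict : List (String × List String)) (out : List (String × List String)) : Decidable (Spec_build_reverse_index priors_dict out) := by unfold Spec_build_reverse_index; infer_instance

-- ===== CLAIM (what is proved, stated in full; the proofs are below) =====
def Claim_equal_build_reverse_index : Prop := ∀ (priors_dict : List (String × List String)), Dom_build_reverse_index priors_dict → Pre_build_reverse_index priors_dict → Spec_build_reverse_index priors_dict (build_reverse_index priors_dict)

-- ===== LEMMAS AND PROOFS =====

-- the keys contributed by one category entry, in A's insertion order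
def pvContrib (p : String × List String) : List String := p.1 :: p.2.map pvClean

-- A's key insertion order over a prefix
def pvKeys (pd : List (String × List String)) : List String :=
  PySem.List.dedup (pd.flatMap pvContrib)

-- the reverse list A ends with at key k, described directly
def pvGather (pd : List (String × List String)) (k : String) : List String :=
  (pd.filter (fun p => p.1 == k || (p.2.map pvClean).contains k)).map Prod.fst

-- a dict in "tabulated" form: items = E.map (fun k => (k, f k))
lemma pv_contains_of_items {d : PySem.Dict String (List String)} {E : List String}
    {f : String → List String} (hd : d.items = E.map (fun k => (k, f k))) (k : String) :
    d.contains k = decide (k ∈ E) := by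
  simp [PySem.Dict.contains, hd, List.any_map, Function.comp_def, List.any_beq']

lemma pv_getD_of_items {d : PySem.Dict String (List String)} {E : List String}
    {f : String → List String} (hd : d.items = E.map (fun k => (k, f k))) (k : String) :
    d.getD k [] = if k ∈ E then f k else [] := by
  induction E generalizing d with
  | nil => simp at hd; simp [PySem.Dict.getD, PySem.Dict.get?, hd]
  | cons a E ih =>
    simp only [List.map_cons] at hd
    by_cases hak : a = k
    · subst hak
      simp [PySem.Dict.getD, PySem.Dict.get?, hd]
    · have : d.getD k [] = (PySem.Dict.mk (E.map (fun k => (k, f k)))).getD k [] := by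
        simp [PySem.Dict.getD, PySem.Dict.get?, hd, hak]
      rw [this, ih rfl]
      simp [List.mem_cons, Ne.symm hak]

lemma pv_items_insert_mem {d : PySem.Dict String (List String)} {E : List String}
    {f : String → List String} (hd : d.items = E.map (fun k => (k, f k)))
    (k : String) (hk : k ∈ E) (v : List String) :
    (d.insert k v).items = E.map (fun x => (x, if x = k then v else f x)) := by
  have hc : d.contains k = true := by
    rw [pv_contains_of_items hd]; simp [hk]
  rw [PySem.Dict.items_insert_of_contains d _ hc, hd, List.map_map]
  apply List.map_congr_left
  intro x _
  by_cases hx : x = k <;> simp [hx]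

lemma pv_items_insert_not_mem {d : PySem.Dict String (List String)} {E : List String}
    {f : String → List String} (hd : d.items = E.map (fun k => (k, f k)))
    (k : String) (hk : k ∉ E) (v : List String) :
    (d.insert k v).items = (E ++ [k]).map (fun x => (x, if x = k then v else f x)) := by
  have hc : d.contains k = false := by
    rw [pv_contains_of_items hd]; simp [hk]
  rw [PySem.Dict.items_insert_of_not_contains d _ hc, hd, List.map_append]
  congr 1
  · apply List.map_congr_left
    intro x hx
    have : x ≠ k := fun h => hk (h ▸ hx)
    simp [this]
  · simp

-- one A inner-loop step, on a tabulated dict of the invariant shape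
lemma pv_step_inv (c : String) (g : String → List String)
    (hcg : ∀ k, c ∉ g k) (item : String) (E S : List String)
    (hgE : ∀ k, k ∉ E → g k = [])
    (d : PySem.Dict String (List String))
    (hd : d.items = E.map (fun k => (k, g k ++ if k ∈ S then [c] else []))) :
    (briInner c d item).items
      = (PySem.Set.add E (pvClean item)).map
          (fun k => (k, g k ++ if k ∈ S ++ [pvClean item] then [c] else [])) := by
  show (( let d' := if d.contains (pvClean item) then d else d.insert (pvClean item) [];
       if c ∈ d'.getD (pvClean item) [] then d'
       else d'.modify (pvClean item) [] (fun l => l ++ [c]) ) :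
        PySem.Dict String (List String)).items = _
  set k0 := pvClean item with hk0def
  have hcont := pv_contains_of_items hd k0
  by_cases hk0 : k0 ∈ E
  · have hc : d.contains k0 = true := by rw [hcont]; simp [hk0]
    have hadd : PySem.Set.add E k0 = E := by
      simp [PySem.Set.add, List.contains_eq_mem, hk0]
    have hgd : d.getD k0 [] = g k0 ++ if k0 ∈ S then [c] else [] := by
      rw [pv_getD_of_items hd, if_pos hk0]
    simp only [hc, if_true, hadd]
    by_cases hS : k0 ∈ S
    · have hcv : c ∈ d.getD k0 [] := by rw [hgd, if_pos hS]; simp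
      rw [if_pos hcv, hd]
      apply List.map_congr_left
      intro x hx
      by_cases hxk : x = k0
      · subst hxk; simp [hS]
      · simp [List.mem_append, hxk]
    · have hcv : c ∉ d.getD k0 [] := by
        rw [hgd, if_neg hS]; simpa using hcg k0
      rw [if_neg hcv, PySem.Dict.modify, hgd, if_neg hS]
      rw [pv_items_insert_mem hd k0 hk0 _]
      apply List.map_congr_left
      intro x hx
      by_cases hxk : x = k0
      · subst hxk; simp [hS]
      · simp [List.mem_append, hxk]
  · have hc : d.contains k0 = false := by rw [hcont]; simp [hk0]
    have hadd : PySem.Set.add E k0 = E ++ [k0] := by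
      simp [PySem.Set.add, List.contains_eq_mem, hk0]
    have hg0 : g k0 = [] := hgE k0 hk0
    simp only [hc, Bool.false_eq_true, if_false]
    have hgd' : (d.insert k0 []).getD k0 [] = [] := PySem.Dict.getD_insert_self d k0 [] []
    rw [hgd']
    simp only [List.not_mem_nil, if_neg, not_false_iff, PySem.Dict.modify, hgd',
      List.nil_append, PySem.Dict.insert_insert_self]
    rw [pv_items_insert_not_mem hd k0 hk0 [c], hadd]
    apply List.map_congr_left
    intro x hx
    by_cases hxk : x = k0
    · subst hxk; simp [hg0]
    · rcases List.mem_append.mp hx with hx | hx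
      · simp [hxk, List.mem_append]
      · simp at hx; exact absurd hx hxk

-- the inner items-loop, tabulated
lemma pv_inner_inv (c : String) (g : String → List String)
    (hcg : ∀ k, c ∉ g k) :
    ∀ (items : List String) (E S : List String),
    (∀ k, k ∉ E → g k = []) →
    ∀ (d : PySem.Dict String (List String)),
    d.items = E.map (fun k => (k, g k ++ if k ∈ S then [c] else [])) →
    (items.foldl (briInner c) d).items
      = ((items.map pvClean).foldl PySem.Set.add E).map
          (fun k => (k, g k ++ if k ∈ S ++ items.map pvClean then [c] else [])) := by
  intro items
  induction items with
  | nil => intro E S hgE d hd; simpa using hd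
  | cons it rest ih =>
    intro E S hgE d hd
    simp only [List.foldl_cons, List.map_cons]
    have hstep := pv_step_inv c g hcg it E S hgE d hd
    have hgE' : ∀ k, k ∉ PySem.Set.add E (pvClean it) → g k = [] := by
      intro k hk
      apply hgE
      intro hkE
      apply hk
      simp only [PySem.Set.add]
      split
      · exact hkE
      · exact List.mem_append.mpr (Or.inl hkE)
    have hS' : S ++ pvClean it :: rest.map pvClean
        = (S ++ [pvClean it]) ++ rest.map pvClean := by simp
    simp only [hS']
    exact ih (PySem.Set.add E (pvClean it)) (S ++ [pvClean it]) hgE' _ hstep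

-- c is never among the gathered categories of a prefix not containing c
lemma pv_not_mem_gather {pd : List (String × List String)} {c : String}
    (hc : c ∉ pd.map Prod.fst) (k : String) : c ∉ pvGather pd k := by
  intro hmem
  unfold pvGather at hmem
  rcases List.mem_map.mp hmem with ⟨p, hp, hpc⟩
  exact hc (List.mem_map.mpr ⟨p, List.mem_of_mem_filter hp, hpc⟩)

-- a key outside pvKeys gathers nothing
lemma pv_gather_eq_nil {pd : List (String × List String)} {k : String}
    (hk : k ∉ pvKeys pd) : pvGather pd k = [] := by
  unfold pvKeys at hk
  rw [pvGather, List.map_eq_nil_iff, List.filter_eq_nil_iff]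
  intro p hp hpred
  apply hk
  rw [PySem.List.mem_dedup]
  apply List.mem_flatMap.mpr
  refine ⟨p, hp, ?_⟩
  unfold pvContrib
  rcases Bool.or_eq_true_iff.mp hpred with h | h
  · simp only [beq_iff_eq] at h; exact h ▸ List.mem_cons_self
  · exact List.mem_cons_of_mem _ (by simpa [List.contains_eq_mem] using h)

-- gather over a prefix extended by one category
lemma pv_gather_append (pd : List (String × List String)) (a : String × List String) (k : String) :
    pvGather (pd ++ [a]) k
      = pvGather pd k ++ if k ∈ a.1 :: a.2.map pvClean then [a.1] else [] := by
  unfold pvGather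
  rw [List.filter_append, List.map_append]
  congr 1
  have hiff : k ∈ a.1 :: a.2.map pvClean ↔ (a.1 == k || (a.2.map pvClean).contains k) = true := by
    simp only [List.mem_cons, Bool.or_eq_true, beq_iff_eq, List.contains_eq_mem,
      decide_eq_true_eq]
    tauto
  by_cases h : k ∈ a.1 :: a.2.map pvClean
  · rw [if_pos h]
    simp only [List.filter_singleton, hiff.mp h]
    rfl
  · rw [if_neg h]
    have hb : (a.1 == k || (a.2.map pvClean).contains k) = false := by
      rcases hb' : (a.1 == k || (a.2.map pvClean).contains k) with _ | _
      · rfl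
      · exact absurd (hiff.mpr hb') h
    rw [List.filter_singleton, hb]
    rfl

-- key order over a prefix extended by one category
lemma pv_keys_append (pd : List (String × List String)) (a : String × List String) :
    pvKeys (pd ++ [a])
      = (a.2.map pvClean).foldl PySem.Set.add (PySem.Set.add (pvKeys pd) a.1) := by
  unfold pvKeys
  rw [List.flatMap_append, PySem.List.dedup_eq_ofList, PySem.List.dedup_eq_ofList,
    PySem.Set.ofList_append]
  have h1 : (([a] : List (String × List String)).flatMap pvContrib)
      = a.1 :: a.2.map pvClean := by simp [pvContrib]
  rw [h1, PySem.Set.update_cons]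
  rfl

-- main invariant: A's fold, tabulated over the whole prefix
lemma pv_outer_inv : ∀ (pd : List (String × List String)),
    (pd.map Prod.fst).Nodup →
    (pd.foldl briOuter PySem.Dict.empty).items
      = (pvKeys pd).map (fun k => (k, pvGather pd k)) := by
  intro pd
  induction pd using List.reverseRecOn with
  | nil => intro _; simp [pvKeys, pvGather]; rfl
  | append_singleton l a ih =>
    intro hnd
    rw [List.map_append] at hnd
    have hndl : (l.map Prod.fst).Nodup := (List.nodup_append.mp hnd).1
    have hcl : a.1 ∉ l.map Prod.fst := by
      have hdisj := (List.nodup_append.mp hnd).2.2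
      intro hmem
      exact hdisj a.1 hmem a.1 (by simp) rfl
    have hd := ih hndl
    set c := a.1 with hc
    set K := pvKeys l with hK
    set d0 := l.foldl briOuter PySem.Dict.empty with hd0
    have hcg : ∀ k, c ∉ pvGather l k := pv_not_mem_gather hcl
    have hgE : ∀ k, k ∉ K → pvGather l k = [] := fun k hk => pv_gather_eq_nil hk
    -- the self-append part of briOuter
    have hself : (((if d0.contains c then d0 else d0.insert c []).modify c []
            (fun l => l ++ [c])).items)
        = (PySem.Set.add K c).map
            (fun k => (k, pvGather l k ++ if k ∈ [c] then [c] else [])) := by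
      have hcont := pv_contains_of_items hd c
      by_cases hck : c ∈ K
      · have hcc : d0.contains c = true := by rw [hcont]; simp [hck]
        have hadd : PySem.Set.add K c = K := by
          simp [PySem.Set.add, List.contains_eq_mem, hck]
        rw [if_pos hcc, PySem.Dict.modify, pv_getD_of_items hd, if_pos hck,
          pv_items_insert_mem hd c hck _, hadd]
        apply List.map_congr_left
        intro x hx
        by_cases hxk : x = c
        · subst hxk; simp
        · simp [hxk]
      · have hcc : d0.contains c = false := by rw [hcont]; simp [hck]
        have hadd : PySem.Set.add K c = K ++ [c] := by
          simp [PySem.Set.add, List.contains_eq_mem, hck]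
        rw [if_neg (by simp [hcc]), PySem.Dict.modify, PySem.Dict.getD_insert_self,
          List.nil_append, PySem.Dict.insert_insert_self,
          pv_items_insert_not_mem hd c hck [c], hadd]
        apply List.map_congr_left
        intro x hx
        by_cases hxk : x = c
        · subst hxk; simp [pv_gather_eq_nil hck]
        · rcases List.mem_append.mp hx with hx | hx
          · simp [hxk]
          · simp at hx; exact absurd hx hxk
    have hgE' : ∀ k, k ∉ PySem.Set.add K c → pvGather l k = [] := by
      intro k hk
      apply hgE
      intro hkK
      apply hk
      simp only [PySem.Set.add]
      split
      · exact hkK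
      · exact List.mem_append.mpr (Or.inl hkK)
    have hred : briOuter d0 a
        = a.2.foldl (briInner c)
            ((if d0.contains c then d0 else d0.insert c []).modify c []
              (fun l => l ++ [c])) := rfl
    rw [List.foldl_append, List.foldl_cons, List.foldl_nil, ← hd0, hred]
    rw [pv_inner_inv c (pvGather l) hcg a.2 (PySem.Set.add K c) [c] hgE' _ hself]
    rw [pv_keys_append]
    apply List.map_congr_left
    intro k hk
    rw [pv_gather_append]
    simp only [List.singleton_append, hc]

-- B's result, rewritten through pvKeys/pvGather
lemma pv_alt_eq (pd : List (String × List String)) :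
    build_reverse_index_alt pd = (pvKeys pd).map (fun k => (k, pvGather pd k)) := by
  unfold build_reverse_index_alt pvKeys pvGather
  simp only [List.flatMap_map, List.filter_map, List.map_map]
  rfl

-- ===== VERDICT (by name: the statement is the Claim_ definition above) =====
theorem build_reverse_index_spec : Claim_equal_build_reverse_index := by
  intro pd _ hpre
  unfold Spec_build_reverse_index build_reverse_index
  rw [pv_outer_inv pd hpre, pv_alt_eq]
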